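-- pv_equiv track=rewrite | github.com/bc36/leetcode | Python/lc1500_1599.py | minOperationsMaxProfit
-- ===== SOURCE A (Python) =====
-- from typing import List, Optional, Tuple
--
-- def minOperationsMaxProfit(
--     customers: List[int], boardingCost: int, runningCost: int
-- ) -> int:
--     ans = -1
--     profit = mx = wait = 0
--     for i, v in enumerate(customers):
--         wait += v
--         onboard = 4 if wait >= 4 else wait
--         wait -= onboard
--         profit += onboard * boardingCost - runningCost
--         if profit > mx:
--             mx = profit
--             ans = i + 1
--     if min(4, wait) * boardingCost > runningCost:  # if it can make profit
--         loop = wait // 4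
--         wait %= 4
--         profit += loop * (4 * boardingCost - runningCost)
--         # remainingProfit = wait * boardingCost - runningCost
--         if profit > mx:
--             ans = len(customers) + loop + (wait * boardingCost > runningCost)
--         elif profit + wait * boardingCost - runningCost > mx:
--             ans = len(customers) + loop + 1
--     return ans
-- ===== SOURCE B (Python) =====
-- def minOperationsMaxProfit(customers, boardingCost, runningCost):
--     # Analytic pass: cumulative boarded after r rotations is 4*r + min_{0<=k<=r}(S_k - 4k)
--     # (with S_k the prefix sum), since boarded(r) = min(boarded(r-1) + 4, S_r).  So profit
--     # at rotation r is a closed formula of the prefix sum and a running minimum; no wait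
--     # queue is simulated.
--     ans, mx = -1, 0
--     s = m = n = 0  # prefix sum; running min of s - 4*r; rotation count
--     for v in customers:
--         s += v
--         n += 1
--         m = min(m, s - 4 * n)
--         p = (4 * n + m) * boardingCost - n * runningCost
--         if p > mx:
--             mx, ans = p, n
--     boarded = 4 * n + m
--     wait = s - boarded
--     profit = boarded * boardingCost - n * runningCost
--     if min(4, wait) * boardingCost > runningCost:
--         full, rem = divmod(wait, 4)
--         p1 = profit + full * (4 * boardingCost - runningCost)
--         if p1 > mx:
--             mx, ans = p1, n + full
--         if p1 + rem * boardingCost - runningCost > mx: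
--             ans = n + full + 1
--     return ans
-- ===== Notes on version B (the rewrite author's own statement) =====
-- stated objective: alternative
-- what changed: A simulates the wait queue (accumulate wait, board min(4,wait), accumulate profit) and resolves leftovers with an if/elif tail using a boolean-as-int indicator; B never simulates boarding: it uses the identity boarded(r) = 4r + min_{k<=r}(S_k - 4k) to compute each rotation's profit as a closed formula from the prefix sum and a running minimum, and replaces the indicator tail by two sequential checkpoint updates of the running maximum.
import Mathlib
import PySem

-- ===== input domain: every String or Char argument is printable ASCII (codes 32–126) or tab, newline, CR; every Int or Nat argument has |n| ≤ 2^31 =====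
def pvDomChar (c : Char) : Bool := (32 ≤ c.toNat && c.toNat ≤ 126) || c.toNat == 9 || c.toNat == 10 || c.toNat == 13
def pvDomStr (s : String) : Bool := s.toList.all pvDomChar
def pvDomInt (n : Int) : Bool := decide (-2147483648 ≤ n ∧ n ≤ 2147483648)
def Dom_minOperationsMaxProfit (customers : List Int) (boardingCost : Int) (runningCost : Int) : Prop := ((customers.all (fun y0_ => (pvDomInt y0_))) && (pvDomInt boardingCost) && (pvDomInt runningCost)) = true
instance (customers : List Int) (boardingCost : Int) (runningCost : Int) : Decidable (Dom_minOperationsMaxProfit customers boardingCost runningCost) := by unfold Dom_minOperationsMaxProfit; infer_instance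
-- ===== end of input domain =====

-- B replaces A's wait-queue simulation by an analytic pass (profit at rotation r is a
-- closed formula of the prefix sum and a running minimum of S_k - 4k) and A's if/elif
-- indicator tail by two sequential checkpoint updates; equal return value proved.

-- ===== PORT A =====
-- A's for-loop over enumerate(customers); state (ans, profit, mx, wait), i the running index.
def pvALoop (boardingCost runningCost : Int) :
    List Int → Int → Int × Int × Int × Int → Int × Int × Int × Int
  | [], _, st => st
  | v :: rest, i, (ans, profit, mx, wait) =>
    let wait1 := wait + v
    let onboard := if wait1 ≥ 4 then (4 : Int) else wait1
    let wait2 := wait1 - onboard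
    let profit1 := profit + onboard * boardingCost - runningCost
    if profit1 > mx then
      pvALoop boardingCost runningCost rest (i + 1) (i + 1, profit1, profit1, wait2)
    else
      pvALoop boardingCost runningCost rest (i + 1) (ans, profit1, mx, wait2)

def minOperationsMaxProfit (customers : List Int) (boardingCost : Int) (runningCost : Int) : Int :=
  let st := pvALoop boardingCost runningCost customers 0 (-1, 0, 0, 0)
  let ans := st.1
  let profit := st.2.1
  let mx := st.2.2.1
  let wait := st.2.2.2
  if (min 4 wait) * boardingCost > runningCost then
    let loop := PySem.Int.floordiv wait 4
    let wait2 := PySem.Int.mod wait 4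
    let profit2 := profit + loop * (4 * boardingCost - runningCost)
    if profit2 > mx then
      (customers.length : Int) + loop + (if wait2 * boardingCost > runningCost then 1 else 0)
    else if profit2 + wait2 * boardingCost - runningCost > mx then
      (customers.length : Int) + loop + 1
    else ans
  else ans

-- ===== PORT B =====
-- B's for-loop; state (ans, mx, s, m, n): prefix sum s, running min m of s - 4*r, count n.
def pvBLoop (boardingCost runningCost : Int) :
    List Int → Int × Int × Int × Int × Int → Int × Int × Int × Int × Int
  | [], st => st
  | v :: rest, (ans, mx, s, m, n) =>
    let s1 := s + v
    let n1 := n + 1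
    let m1 := min m (s1 - 4 * n1)
    let p := (4 * n1 + m1) * boardingCost - n1 * runningCost
    if p > mx then pvBLoop boardingCost runningCost rest (n1, p, s1, m1, n1)
    else pvBLoop boardingCost runningCost rest (ans, mx, s1, m1, n1)

def minOperationsMaxProfit_alt (customers : List Int) (boardingCost : Int) (runningCost : Int) : Int :=
  let st := pvBLoop boardingCost runningCost customers (-1, 0, 0, 0, 0)
  let ans := st.1
  let mx := st.2.1
  let s := st.2.2.1
  let m := st.2.2.2.1
  let n := st.2.2.2.2
  let boarded := 4 * n + m
  let wait := s - boarded
  let profit := boarded * boardingCost - n * runningCost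
  if (min 4 wait) * boardingCost > runningCost then
    let full := PySem.Int.floordiv wait 4
    let rem := PySem.Int.mod wait 4
    let p1 := profit + full * (4 * boardingCost - runningCost)
    let mxa := if p1 > mx then (p1, n + full) else (mx, ans)
    if p1 + rem * boardingCost - runningCost > mxa.1 then n + full + 1 else mxa.2
  else ans

-- ===== PRECONDITION & SPEC =====
def Spec_minOperationsMaxProfit (customers : List Int) (boardingCost : Int) (runningCost : Int) (out : Int) : Prop := out = minOperationsMaxProfit_alt customers boardingCost runningCost
instance (customers : List Int) (boardingCost : Int) (runningCost : Int) (out : Int) : Decidable (Spec_minOperationsMaxProfit customers boardingCost runningCost out) := by unfold Spec_minOperationsMaxProfit; infer_instance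

-- ===== CLAIM (what is proved, stated in full; the proofs are below) =====
def Claim_equal_minOperationsMaxProfit : Prop := ∀ (customers : List Int) (boardingCost : Int) (runningCost : Int), Dom_minOperationsMaxProfit customers boardingCost runningCost → Spec_minOperationsMaxProfit customers boardingCost runningCost (minOperationsMaxProfit customers boardingCost runningCost)

-- ===== LEMMAS AND PROOFS =====

-- Main-loop correspondence: A's simulated state is determined by B's analytic state via
-- profit = (4n+m)*bc - n*rc and wait = s - (4n+m); ans and mx coincide.
theorem pvMain_eq (bc rc : Int) (cs : List Int) (k ans mx s m : Int) :
    pvALoop bc rc cs k (ans, (4 * k + m) * bc - k * rc, mx, s - (4 * k + m)) =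
      (let st := pvBLoop bc rc cs (ans, mx, s, m, k)
       (st.1, (4 * st.2.2.2.2 + st.2.2.2.1) * bc - st.2.2.2.2 * rc, st.2.1,
        st.2.2.1 - (4 * st.2.2.2.2 + st.2.2.2.1))) := by
  induction cs generalizing k ans mx s m with
  | nil => simp [pvALoop, pvBLoop]
  | cons v rest ih =>
    have honb : (if s - (4 * k + m) + v ≥ 4 then (4 : Int) else s - (4 * k + m) + v)
        = (4 * (k + 1) + min m (s + v - 4 * (k + 1))) - (4 * k + m) := by
      simp only [min_def]; split_ifs <;> omega
    have hw : s - (4 * k + m) + v -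
        (if s - (4 * k + m) + v ≥ 4 then (4 : Int) else s - (4 * k + m) + v)
        = s + v - (4 * (k + 1) + min m (s + v - 4 * (k + 1))) := by omega
    have hp : (4 * k + m) * bc - k * rc +
        (if s - (4 * k + m) + v ≥ 4 then (4 : Int) else s - (4 * k + m) + v) * bc - rc
        = (4 * (k + 1) + min m (s + v - 4 * (k + 1))) * bc - (k + 1) * rc := by
      rw [honb]; ring
    by_cases hc : (4 * (k + 1) + min m (s + v - 4 * (k + 1))) * bc - (k + 1) * rc > mx <;>
      simp only [pvALoop, pvBLoop, hw, hp, hc, if_true, if_false] <;>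
      exact ih (k + 1) _ _ (s + v) _

-- B's rotation count equals the starting count plus the list length.
theorem pvBLoop_count (bc rc : Int) (cs : List Int) (st : Int × Int × Int × Int × Int) :
    (pvBLoop bc rc cs st).2.2.2.2 = st.2.2.2.2 + cs.length := by
  induction cs generalizing st with
  | nil => simp [pvBLoop]
  | cons v rest ih =>
    obtain ⟨ans, mx, s, m, n⟩ := st
    simp only [pvBLoop]
    split_ifs <;> simp [ih] <;> ring

-- ===== VERDICT (by name: the statement is the Claim_ definition above) =====
theorem minOperationsMaxProfit_spec : Claim_equal_minOperationsMaxProfit := by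
  intro customers bc rc _
  unfold Spec_minOperationsMaxProfit minOperationsMaxProfit minOperationsMaxProfit_alt
  have h0 := pvMain_eq bc rc customers 0 (-1) 0 0 0
  simp only [show (4 * (0:Int) + 0) * bc - 0 * rc = 0 by ring,
    show (0:Int) - (4 * 0 + 0) = 0 by ring] at h0
  have hn := pvBLoop_count bc rc customers (-1, 0, 0, 0, 0)
  norm_num at hn
  rw [h0]
  simp only [hn]
  split_ifs <;> first | rfl | linarith
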